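-- pv_equiv track=rewrite | github.com/cirosantilli/project-euler-solutions | solvers/851.py | tau_prime_power
-- ===== SOURCE A (Python) =====
-- def mat_mul(
--     A: tuple[int, int, int, int], B: tuple[int, int, int, int], mod: int
-- ) -> tuple[int, int, int, int]:
--     a, b, c, d = A
--     e, f, g, h = B
--     return (
--         (a * e + b * g) % mod,
--         (a * f + b * h) % mod,
--         (c * e + d * g) % mod,
--         (c * f + d * h) % mod,
--     )
--
-- def tau_prime_power(p: int, e: int, tau_p: int, mod: int) -> int:
--     """Compute tau(p^e) modulo mod using tau(p^{k+1}) = tau(p)*tau(p^k) - p^{11}*tau(p^{k-1})."""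
--     if e == 0:
--         return 1
--     if e == 1:
--         return tau_p % mod
--
--     p11 = pow(p, 11, mod)
--     # Companion matrix for the recurrence
--     M = (tau_p % mod, (-p11) % mod, 1, 0)
--     # Compute M^(e-1)
--     R = (1, 0, 0, 1)
--     exp = e - 1
--     while exp:
--         if exp & 1:
--             R = mat_mul(R, M, mod)
--         M = mat_mul(M, M, mod)
--         exp >>= 1
--
--     # Apply to vector [tau(p), tau(1)] = [tau_p, 1]
--     a, b, c, d = R
--     return (a * (tau_p % mod) + b) % mod
-- ===== SOURCE B (Python) =====
-- def _fd(tau_p, q, mod, n):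
--     """(U_n, U_{n+1}) mod `mod` by fast doubling, where U_0=0, U_1=1,
--     U_{k+2} = tau_p*U_{k+1} - q*U_k."""
--     if n == 0:
--         return 0, 1
--     a, b = _fd(tau_p, q, mod, n >> 1)
--     c = a * (2 * b - tau_p * a) % mod          # U_{2k}
--     d = (b * b - q * a * a) % mod              # U_{2k+1}
--     if n & 1:
--         return d, (tau_p * d - q * c) % mod
--     return c, d
--
-- def tau_prime_power(p, e, tau_p, mod):
--     """Compute tau(p^e) modulo mod: tau(p^e) = U_{e+1} of the Lucas sequence
--     with parameters (tau_p, p^11), computed by scalar fast doubling."""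
--     if e == 0:
--         return 1
--     if e == 1:
--         return tau_p % mod
--     q = pow(p, 11, mod)
--     return _fd(tau_p, q, mod, e + 1)[0]
-- ===== Notes on version B (the rewrite author's own statement) =====
-- stated objective: alternative
-- what changed: Replaces the 2x2 companion-matrix square-and-multiply (mat_mul helper, identity-matrix accumulator, final matrix-vector application) with Lucas-sequence fast doubling on scalar pairs (U_n, U_{n+1}) using the identities U_2n = U_n(2U_{n+1} - tau*U_n) and U_{2n+1} = U_{n+1}^2 - p^11*U_n^2.
import Mathlib
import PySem

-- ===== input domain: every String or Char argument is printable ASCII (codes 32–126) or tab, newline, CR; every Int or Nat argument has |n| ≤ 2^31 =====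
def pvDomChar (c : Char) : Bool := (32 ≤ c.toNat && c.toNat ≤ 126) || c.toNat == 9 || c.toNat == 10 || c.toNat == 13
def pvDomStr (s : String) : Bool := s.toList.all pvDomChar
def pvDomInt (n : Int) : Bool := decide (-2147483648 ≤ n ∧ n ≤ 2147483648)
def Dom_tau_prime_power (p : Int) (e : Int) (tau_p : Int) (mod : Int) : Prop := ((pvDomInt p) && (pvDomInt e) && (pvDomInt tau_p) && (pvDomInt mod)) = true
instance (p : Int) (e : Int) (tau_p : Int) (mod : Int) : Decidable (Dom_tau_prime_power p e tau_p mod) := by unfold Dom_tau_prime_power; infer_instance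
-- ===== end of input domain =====

-- B replaces A's companion-matrix binary exponentiation by Lucas-sequence fast
-- doubling on scalar pairs (U_n, U_{n+1}) (alternative algorithm; not claimed faster).


-- ===== PORT A =====
-- mat_mul: 2x2 matrices as 4-tuples, every entry reduced with Python's %
def pvMatMul (A : Int × Int × Int × Int) (B : Int × Int × Int × Int) (mod : Int) :
    Int × Int × Int × Int :=
  let (a, b, c, d) := A
  let (e, f, g, h) := B
  (PySem.Int.mod (a * e + b * g) mod, PySem.Int.mod (a * f + b * h) mod,
   PySem.Int.mod (c * e + d * g) mod, PySem.Int.mod (c * f + d * h) mod)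

-- A's 'while exp:' square-and-multiply loop; under Pre_ the Python exp is ≥ 0
-- (for negative exp the Python loop never terminates — excluded by Pre_), so it
-- is recursion on a Nat; 'exp & 1' on a nonnegative int is 'exp % 2 = 1'.
def pvPowLoop (mod : Int) (R M : Int × Int × Int × Int) (exp : Nat) :
    Int × Int × Int × Int :=
  if h : exp = 0 then R
  else pvPowLoop mod (if exp % 2 = 1 then pvMatMul R M mod else R) (pvMatMul M M mod) (exp / 2)
  decreasing_by exact Nat.div_lt_self (Nat.pos_of_ne_zero h) one_lt_two

def tau_prime_power (p : Int) (e : Int) (tau_p : Int) (mod : Int) : Int :=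
  if e = 0 then 1
  else if e = 1 then PySem.Int.mod tau_p mod
  else
    let p11 := PySem.Int.powMod p 11 mod
    let M := (PySem.Int.mod tau_p mod, PySem.Int.mod (-p11) mod, (1 : Int), (0 : Int))
    let R := pvPowLoop mod (1, 0, 0, 1) M (e - 1).toNat
    PySem.Int.mod (R.1 * PySem.Int.mod tau_p mod + R.2.1) mod

-- ===== PORT B =====
-- _fd: (U_n, U_{n+1}) mod m by fast doubling; 'n >> 1' is n / 2, 'n & 1' is n % 2
def pvFD (tau_p q mod : Int) (n : Nat) : Int × Int :=
  if h : n = 0 then (0, 1)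
  else
    let ab := pvFD tau_p q mod (n / 2)
    let c := PySem.Int.mod (ab.1 * (2 * ab.2 - tau_p * ab.1)) mod
    let d := PySem.Int.mod (ab.2 * ab.2 - q * ab.1 * ab.1) mod
    if n % 2 = 1 then (d, PySem.Int.mod (tau_p * d - q * c) mod) else (c, d)
  decreasing_by exact Nat.div_lt_self (Nat.pos_of_ne_zero h) one_lt_two

def tau_prime_power_alt (p : Int) (e : Int) (tau_p : Int) (mod : Int) : Int :=
  if e = 0 then 1
  else if e = 1 then PySem.Int.mod tau_p mod
  else (pvFD tau_p (PySem.Int.powMod p 11 mod) mod (e + 1).toNat).1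

-- ===== PRECONDITION & SPEC =====
-- Pre_ excludes exactly the inputs where Python A returns no value: mod = 0 with
-- e ≥ 1 (ZeroDivisionError in pow/%) and e < 0 (the 'while exp' loop diverges).
def Pre_tau_prime_power (p : Int) (e : Int) (tau_p : Int) (mod : Int) : Prop :=
  e = 0 ∨ (1 ≤ e ∧ mod ≠ 0)
instance (p : Int) (e : Int) (tau_p : Int) (mod : Int) : Decidable (Pre_tau_prime_power p e tau_p mod) := by unfold Pre_tau_prime_power; infer_instance

def pvWitness_tau_prime_power : Int × Int × Int × Int := (2, 3, 5, 7)

def Spec_tau_prime_power (p : Int) (e : Int) (tau_p : Int) (mod : Int) (out : Int) : Prop := out = tau_prime_power_alt p e tau_p mod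
instance (p : Int) (e : Int) (tau_p : Int) (mod : Int) (out : Int) : Decidable (Spec_tau_prime_power p e tau_p mod out) := by unfold Spec_tau_prime_power; infer_instance

-- ===== CLAIM (what is proved, stated in full; the proofs are below) =====
def Claim_equal_tau_prime_power : Prop := ∀ (p : Int) (e : Int) (tau_p : Int) (mod : Int), Dom_tau_prime_power p e tau_p mod → Pre_tau_prime_power p e tau_p mod → Spec_tau_prime_power p e tau_p mod (tau_prime_power p e tau_p mod)

-- ===== LEMMAS AND PROOFS =====

-- the pure (unreduced) recurrence tau(p^n): t 0 = 1, t 1 = tau, t (n+2) = tau*t(n+1) - p11*t n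
def pvT (tau p11 : Int) : Nat → Int
  | 0 => 1
  | 1 => tau
  | n + 2 => tau * pvT tau p11 (n + 1) - p11 * pvT tau p11 n

-- pure 2x2 matrix product and power (no reduction)
def pvMulZ (A B : Int × Int × Int × Int) : Int × Int × Int × Int :=
  (A.1 * B.1 + A.2.1 * B.2.2.1, A.1 * B.2.1 + A.2.1 * B.2.2.2,
   A.2.2.1 * B.1 + A.2.2.2 * B.2.2.1, A.2.2.1 * B.2.1 + A.2.2.2 * B.2.2.2)

def pvPowZ (M : Int × Int × Int × Int) : Nat → Int × Int × Int × Int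
  | 0 => (1, 0, 0, 1)
  | n + 1 => pvMulZ M (pvPowZ M n)

-- componentwise congruence mod m
def pvMEq (m : Int) (A B : Int × Int × Int × Int) : Prop :=
  A.1 ≡ B.1 [ZMOD m] ∧ A.2.1 ≡ B.2.1 [ZMOD m] ∧ A.2.2.1 ≡ B.2.2.1 [ZMOD m] ∧ A.2.2.2 ≡ B.2.2.2 [ZMOD m]

theorem pvMod_modEq (a m : Int) : PySem.Int.mod a m ≡ a [ZMOD m] := by
  unfold PySem.Int.mod Int.ModEq
  rw [Int.fmod_eq_emod]
  split_ifs with h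
  · simp
  · simp [Int.add_emod_right, Int.emod_emod_of_dvd]

theorem pvMod_congr {a b m : Int} (h : a ≡ b [ZMOD m]) : PySem.Int.mod a m = PySem.Int.mod b m := by
  unfold PySem.Int.mod
  rw [Int.fmod_eq_emod, Int.fmod_eq_emod]
  have hd : m ∣ a ↔ m ∣ b := by
    rw [Int.dvd_iff_emod_eq_zero, Int.dvd_iff_emod_eq_zero, h]
  unfold Int.ModEq at h
  rw [h]
  by_cases h0 : 0 ≤ m ∨ m ∣ a
  · rw [if_pos h0, if_pos (by tauto)]
  · rw [if_neg h0, if_neg (by tauto)]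

theorem pvMatMul_cong {m : Int} {A B A' B' : Int × Int × Int × Int}
    (hA : pvMEq m A A') (hB : pvMEq m B B') : pvMEq m (pvMatMul A B m) (pvMulZ A' B') := by
  obtain ⟨a, b, c, d⟩ := A; obtain ⟨e, f, g, h⟩ := B
  obtain ⟨a', b', c', d'⟩ := A'; obtain ⟨e', f', g', h'⟩ := B'
  obtain ⟨h1, h2, h3, h4⟩ := hA; obtain ⟨h5, h6, h7, h8⟩ := hB
  simp only [pvMatMul, pvMulZ, pvMEq] at *
  exact ⟨(pvMod_modEq _ _).trans ((h1.mul h5).add (h2.mul h7)),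
         (pvMod_modEq _ _).trans ((h1.mul h6).add (h2.mul h8)),
         (pvMod_modEq _ _).trans ((h3.mul h5).add (h4.mul h7)),
         (pvMod_modEq _ _).trans ((h3.mul h6).add (h4.mul h8))⟩

theorem pvMEq_refl (m : Int) (A : Int × Int × Int × Int) : pvMEq m A A :=
  ⟨Int.ModEq.refl _, Int.ModEq.refl _, Int.ModEq.refl _, Int.ModEq.refl _⟩

theorem pvMulZ_assoc (A B C : Int × Int × Int × Int) :
    pvMulZ (pvMulZ A B) C = pvMulZ A (pvMulZ B C) := by
  simp only [pvMulZ, Prod.mk.injEq]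
  refine ⟨by ring, by ring, by ring, by ring⟩

theorem pvMulZ_one_left (A : Int × Int × Int × Int) : pvMulZ (1, 0, 0, 1) A = A := by
  simp only [pvMulZ]
  obtain ⟨a, b, c, d⟩ := A
  simp only [Prod.mk.injEq]
  refine ⟨by ring, by ring, by ring, by ring⟩

theorem pvMulZ_one_right (A : Int × Int × Int × Int) : pvMulZ A (1, 0, 0, 1) = A := by
  simp only [pvMulZ]
  obtain ⟨a, b, c, d⟩ := A
  simp only [Prod.mk.injEq]
  refine ⟨by ring, by ring, by ring, by ring⟩

theorem pvPowZ_add (M : Int × Int × Int × Int) (a b : Nat) :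
    pvPowZ M (a + b) = pvMulZ (pvPowZ M a) (pvPowZ M b) := by
  induction a with
  | zero => simp [pvPowZ, pvMulZ_one_left]
  | succ n ih =>
      have : n + 1 + b = (n + b) + 1 := by omega
      rw [this]
      simp only [pvPowZ, ih, ← pvMulZ_assoc]

theorem pvPowZ_sq (M : Int × Int × Int × Int) (k : Nat) :
    pvPowZ (pvMulZ M M) k = pvPowZ M (2 * k) := by
  induction k with
  | zero => simp [pvPowZ]
  | succ n ih =>
      calc pvPowZ (pvMulZ M M) (n + 1) = pvMulZ (pvMulZ M M) (pvPowZ M (2 * n)) := by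
            rw [pvPowZ, ih]
        _ = pvMulZ (pvPowZ M 2) (pvPowZ M (2 * n)) := by
            rw [show pvPowZ M 2 = pvMulZ M M from by simp [pvPowZ, pvMulZ_one_right]]
        _ = pvPowZ M (2 + 2 * n) := (pvPowZ_add M 2 (2 * n)).symm
        _ = pvPowZ M (2 * (n + 1)) := by rw [show 2 + 2 * n = 2 * (n + 1) from by omega]

theorem pvPowLoop_cong (m : Int) : ∀ (exp : Nat) (R M R0 M0 : Int × Int × Int × Int),
    pvMEq m R R0 → pvMEq m M M0 →
    pvMEq m (pvPowLoop m R M exp) (pvMulZ R0 (pvPowZ M0 exp)) := by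
  intro exp
  induction exp using Nat.strong_induction_on with
  | _ exp ih =>
    intro R M R0 M0 hR hM
    by_cases h0 : exp = 0
    · subst h0
      rw [pvPowLoop]
      simpa [pvPowZ, pvMulZ_one_right] using hR
    · rw [pvPowLoop, dif_neg h0]
      have hdiv : exp / 2 < exp := Nat.div_lt_self (Nat.pos_of_ne_zero h0) one_lt_two
      have hR' : pvMEq m (if exp % 2 = 1 then pvMatMul R M m else R)
          (pvMulZ R0 (pvPowZ M0 (exp % 2))) := by
        by_cases hp : exp % 2 = 1
        · rw [if_pos hp, hp]
          simpa [pvPowZ, pvMulZ_one_right] using pvMatMul_cong hR hM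
        · have hz : exp % 2 = 0 := by omega
          rw [if_neg hp, hz]
          simpa [pvPowZ, pvMulZ_one_right] using hR
      have := ih (exp / 2) hdiv _ (pvMatMul M M m) _ (pvMulZ M0 M0) hR' (pvMatMul_cong hM hM)
      have heq : pvMulZ (pvMulZ R0 (pvPowZ M0 (exp % 2))) (pvPowZ (pvMulZ M0 M0) (exp / 2))
          = pvMulZ R0 (pvPowZ M0 exp) := by
        rw [pvPowZ_sq, pvMulZ_assoc, ← pvPowZ_add, Nat.mod_add_div]
      rwa [heq] at this

-- first row of M0^n applied to the start vector [tau, 1] gives pvT (n+1); second row gives pvT n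
theorem pvPowZ_apply (tau p11 : Int) (n : Nat) :
    (pvPowZ (tau, -p11, 1, 0) n).1 * tau + (pvPowZ (tau, -p11, 1, 0) n).2.1 = pvT tau p11 (n + 1) ∧
    (pvPowZ (tau, -p11, 1, 0) n).2.2.1 * tau + (pvPowZ (tau, -p11, 1, 0) n).2.2.2 = pvT tau p11 n := by
  induction n with
  | zero => simp [pvPowZ, pvT]
  | succ k ih =>
      obtain ⟨h1, h2⟩ := ih
      constructor
      · show (tau * (pvPowZ (tau, -p11, 1, 0) k).1 + -p11 * (pvPowZ (tau, -p11, 1, 0) k).2.2.1) * tau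
            + (tau * (pvPowZ (tau, -p11, 1, 0) k).2.1 + -p11 * (pvPowZ (tau, -p11, 1, 0) k).2.2.2)
            = pvT tau p11 (k + 2)
        have : pvT tau p11 (k + 2) = tau * pvT tau p11 (k + 1) - p11 * pvT tau p11 k := rfl
        rw [this, ← h1, ← h2]; ring
      · show (1 * (pvPowZ (tau, -p11, 1, 0) k).1 + 0 * (pvPowZ (tau, -p11, 1, 0) k).2.2.1) * tau
            + (1 * (pvPowZ (tau, -p11, 1, 0) k).2.1 + 0 * (pvPowZ (tau, -p11, 1, 0) k).2.2.2)
            = pvT tau p11 (k + 1)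
        rw [← h1]; ring

-- the Lucas sequence U: U 0 = 0, U 1 = 1, U (n+2) = tau*U(n+1) - q*U n; pvT k = U (k+1)
def pvU (tau q : Int) : Nat → Int
  | 0 => 0
  | 1 => 1
  | n + 2 => tau * pvU tau q (n + 1) - q * pvU tau q n

theorem pvU_rec (tau q : Int) (n : Nat) :
    pvU tau q (n + 2) = tau * pvU tau q (n + 1) - q * pvU tau q n := rfl

theorem pvT_eq_U (tau q : Int) : ∀ k, pvT tau q k = pvU tau q (k + 1) := by
  intro k
  induction k using Nat.strong_induction_on with
  | _ k ih =>
    match k with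
    | 0 => rfl
    | 1 => show tau = tau * 1 - q * 0; ring
    | k + 2 =>
      show tau * pvT tau q (k + 1) - q * pvT tau q k = _
      rw [ih (k + 1) (by omega), ih k (by omega)]
      rfl

theorem pvU_add (tau q : Int) : ∀ (n m : Nat),
    pvU tau q (m + n + 1) = pvU tau q (m + 1) * pvU tau q (n + 1) - q * pvU tau q m * pvU tau q n := by
  intro n
  induction n using Nat.strong_induction_on with
  | _ n ih =>
    match n with
    | 0 => intro m; show pvU tau q (m + 1) = pvU tau q (m + 1) * 1 - q * pvU tau q m * 0; ring
    | 1 =>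
      intro m
      have h1 : m + 1 + 1 = m + 2 := by omega
      rw [h1, pvU_rec tau q m]
      show _ = pvU tau q (m + 1) * pvU tau q 2 - q * pvU tau q m * 1
      have h2 : pvU tau q 2 = tau * 1 - q * 0 := rfl
      rw [h2]; ring
    | n + 2 =>
      intro m
      have h1 : m + (n + 2) + 1 = (m + n + 1) + 2 := by omega
      rw [h1, pvU_rec]
      have ha := ih (n + 1) (by omega) m
      have hb := ih n (by omega) m
      rw [show m + (n + 1) + 1 = m + n + 1 + 1 from by omega,
          show n + 1 + 1 = n + 2 from by omega] at ha
      have hrec2 := pvU_rec tau q (n + 1)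
      rw [show n + 1 + 2 = n + 3 from by omega, show n + 1 + 1 = n + 2 from by omega] at hrec2
      have hrec1 := pvU_rec tau q n
      rw [show n + 2 + 1 = n + 3 from by omega]
      linear_combination tau * ha - q * hb - pvU tau q (m + 1) * hrec2 + q * pvU tau q m * hrec1

theorem pvU_double (tau q : Int) (k : Nat) :
    pvU tau q (2 * k) = pvU tau q k * (2 * pvU tau q (k + 1) - tau * pvU tau q k) := by
  match k with
  | 0 => show (0 : Int) = 0 * _; ring
  | j + 1 =>
    have h1 : 2 * (j + 1) = (j + 1) + j + 1 := by omega
    rw [h1]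
    have hadd := pvU_add tau q j (j + 1)
    have h2 : j + 1 + 1 = j + 2 := by omega
    rw [h2] at hadd
    have hrec := pvU_rec tau q j
    rw [hadd, hrec]; ring

theorem pvU_double_succ (tau q : Int) (k : Nat) :
    pvU tau q (2 * k + 1) = pvU tau q (k + 1) * pvU tau q (k + 1) - q * pvU tau q k * pvU tau q k := by
  have h1 : 2 * k + 1 = k + k + 1 := by omega
  rw [h1, pvU_add tau q k k]

theorem pvFD_eq (tau q m : Int) (n : Nat) (h : n ≠ 0) :
    pvFD tau q m n =
      if n % 2 = 1 then
        (PySem.Int.mod ((pvFD tau q m (n / 2)).2 * (pvFD tau q m (n / 2)).2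
            - q * (pvFD tau q m (n / 2)).1 * (pvFD tau q m (n / 2)).1) m,
         PySem.Int.mod (tau * PySem.Int.mod ((pvFD tau q m (n / 2)).2 * (pvFD tau q m (n / 2)).2
              - q * (pvFD tau q m (n / 2)).1 * (pvFD tau q m (n / 2)).1) m
            - q * PySem.Int.mod ((pvFD tau q m (n / 2)).1
              * (2 * (pvFD tau q m (n / 2)).2 - tau * (pvFD tau q m (n / 2)).1)) m) m)
      else
        (PySem.Int.mod ((pvFD tau q m (n / 2)).1
            * (2 * (pvFD tau q m (n / 2)).2 - tau * (pvFD tau q m (n / 2)).1)) m,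
         PySem.Int.mod ((pvFD tau q m (n / 2)).2 * (pvFD tau q m (n / 2)).2
            - q * (pvFD tau q m (n / 2)).1 * (pvFD tau q m (n / 2)).1) m) := by
  rw [pvFD, dif_neg h]

-- fast doubling computes (U n, U (n+1)) mod m; for n ≠ 0 the first component is a reduced value
theorem pvFD_spec (tau q' q m : Int) (hq : q' ≡ q [ZMOD m]) : ∀ (n : Nat),
    ((pvFD tau q' m n).1 ≡ pvU tau q n [ZMOD m] ∧ (pvFD tau q' m n).2 ≡ pvU tau q (n + 1) [ZMOD m]) ∧
    (n ≠ 0 → ∃ X, (pvFD tau q' m n).1 = PySem.Int.mod X m ∧ X ≡ pvU tau q n [ZMOD m]) := by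
  intro n
  induction n using Nat.strong_induction_on with
  | _ n ih =>
    by_cases h0 : n = 0
    · subst h0
      refine ⟨⟨by rw [pvFD]; simp [pvU], ?_⟩, by tauto⟩
      rw [pvFD]
      show (1 : Int) ≡ pvU tau q 1 [ZMOD m]
      rfl
    · obtain ⟨⟨ha, hb⟩, -⟩ := ih (n / 2) (Nat.div_lt_self (Nat.pos_of_ne_zero h0) one_lt_two)
      rw [pvFD_eq tau q' m n h0]
      generalize hAB : pvFD tau q' m (n / 2) = AB at ha hb ⊢
      obtain ⟨A, B⟩ := AB
      dsimp only at ha hb ⊢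
      have hc : A * (2 * B - tau * A) ≡ pvU tau q (2 * (n / 2)) [ZMOD m] := by
        rw [pvU_double]
        exact ha.mul (((Int.ModEq.refl 2).mul hb).sub ((Int.ModEq.refl tau).mul ha))
      have hd : B * B - q' * A * A ≡ pvU tau q (2 * (n / 2) + 1) [ZMOD m] := by
        rw [pvU_double_succ]
        exact (hb.mul hb).sub ((hq.mul ha).mul ha)
      by_cases hp : n % 2 = 1
      · rw [if_pos hp]
        have hn2 : 2 * (n / 2) + 1 = n := by omega
        rw [hn2] at hd
        refine ⟨⟨(pvMod_modEq _ _).trans hd, ?_⟩,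
          fun _ => ⟨B * B - q' * A * A, rfl, hd⟩⟩
        rw [show n + 1 = 2 * (n / 2) + 2 from by omega, pvU_rec, hn2]
        exact (pvMod_modEq _ _).trans
          (((Int.ModEq.refl tau).mul ((pvMod_modEq _ _).trans hd)).sub
            (hq.mul ((pvMod_modEq _ _).trans hc)))
      · rw [if_neg hp]
        have hn2 : 2 * (n / 2) = n := by omega
        rw [hn2] at hc
        refine ⟨⟨(pvMod_modEq _ _).trans hc, ?_⟩,
          fun _ => ⟨A * (2 * B - tau * A), rfl, hc⟩⟩
        rw [show n + 1 = 2 * (n / 2) + 1 from by omega]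
        exact (pvMod_modEq _ _).trans hd

-- ===== VERDICT (by name: the statement is the Claim_ definition above) =====
theorem tau_prime_power_spec : Claim_equal_tau_prime_power := by
  intro p e tau_p mod _ hPre
  unfold Spec_tau_prime_power tau_prime_power tau_prime_power_alt
  by_cases h0 : e = 0
  · simp [h0]
  · by_cases h1 : e = 1
    · simp [h1]
    · rw [if_neg h0, if_neg h1, if_neg h0, if_neg h1]
      have he2 : 2 ≤ e := by rcases hPre with h | ⟨h, -⟩ <;> omega
      set p11r := PySem.Int.powMod p 11 mod with hp11r
      have hp : p11r ≡ p ^ 11 [ZMOD mod] := pvMod_modEq _ _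
      set n := (e - 1).toNat with hn
      have hidx : n + 1 + 1 = (e + 1).toNat := by omega
      -- A side: the matrix-power result applied to [tau_p, 1] is congruent to pvT (n+1)
      have hM : pvMEq mod (PySem.Int.mod tau_p mod, PySem.Int.mod (-p11r) mod, (1 : Int), (0 : Int))
          (tau_p, -(p ^ 11), 1, 0) :=
        ⟨pvMod_modEq _ _, (pvMod_modEq _ _).trans hp.neg, Int.ModEq.refl _, Int.ModEq.refl _⟩
      have hA := pvPowLoop_cong mod n (1, 0, 0, 1) _ (1, 0, 0, 1) _ (pvMEq_refl mod _) hM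
      rw [pvMulZ_one_left] at hA
      obtain ⟨ha, hb, -, -⟩ := hA
      obtain ⟨happ, -⟩ := pvPowZ_apply tau_p (p ^ 11) n
      have hAres : (pvPowLoop mod (1, 0, 0, 1)
            (PySem.Int.mod tau_p mod, PySem.Int.mod (-p11r) mod, 1, 0) n).1 * PySem.Int.mod tau_p mod
          + (pvPowLoop mod (1, 0, 0, 1)
            (PySem.Int.mod tau_p mod, PySem.Int.mod (-p11r) mod, 1, 0) n).2.1
          ≡ pvT tau_p (p ^ 11) (n + 1) [ZMOD mod] := by
        rw [← happ]
        exact (ha.mul (pvMod_modEq tau_p mod)).add hb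
      -- B side: fast doubling at (e+1).toNat gives a reduced value congruent to pvU ((e+1).toNat)
      obtain ⟨-, hex⟩ := pvFD_spec tau_p p11r (p ^ 11) mod hp (e + 1).toNat
      obtain ⟨X, hX, hXc⟩ := hex (by omega)
      rw [hX]
      -- both sides are congruent to the same pure value
      rw [pvT_eq_U tau_p (p ^ 11) (n + 1), hidx] at hAres
      exact pvMod_congr (hAres.trans hXc.symm)
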